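-- pv_equiv track=rewrite | github.com/lemollon/AlphaGEX | quant/ensemble_strategy.py | _map_strategy_to_category
-- ===== SOURCE A (Python) =====
-- from typing import Dict, List, Optional, Tuple
--
-- def _map_strategy_to_category(strategy_name: str) -> Optional[str]:
--     """Map specific strategy names to ensemble categories"""
--     if not strategy_name:
--         return None
--
--     upper = strategy_name.upper()
--
--     if any(s in upper for s in ['GEX', 'GAMMA', 'FLIP']):
--         return 'GEX_REGIME'
--     elif any(s in upper for s in ['PSYCHOLOGY', 'TRAP', 'LIBERATION']):
--         return 'PSYCHOLOGY_TRAP'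
--     elif any(s in upper for s in ['RSI', 'MOMENTUM']):
--         return 'RSI_MULTI_TF'
--     elif any(s in upper for s in ['VOL', 'IV', 'SURFACE', 'SKEW']):
--         return 'VOL_SURFACE'
--     elif any(s in upper for s in ['ML', 'MACHINE', 'CLASSIFIER']):
--         return 'ML_CLASSIFIER'
--
--     return 'GEX_REGIME'  # Default
-- ===== SOURCE B (Python) =====
-- _KEYWORDS = [
--     ("GEX", 0), ("GAMMA", 0), ("FLIP", 0),
--     ("PSYCHOLOGY", 1), ("TRAP", 1), ("LIBERATION", 1),
--     ("RSI", 2), ("MOMENTUM", 2),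
--     ("VOL", 3), ("IV", 3), ("SURFACE", 3), ("SKEW", 3),
--     ("ML", 4), ("MACHINE", 4), ("CLASSIFIER", 4),
-- ]
-- _CATEGORIES = ["GEX_REGIME", "PSYCHOLOGY_TRAP", "RSI_MULTI_TF", "VOL_SURFACE", "ML_CLASSIFIER"]
--
-- def _map_strategy_to_category(strategy_name):
--     """Single left-to-right scan of the name: at each position record the best
--     (lowest) priority of any keyword anchored there, then map that priority."""
--     if not strategy_name:
--         return None
--     upper = strategy_name.upper()
--     best = 5
--     for i in range(len(upper)):
--         for kw, pr in _KEYWORDS: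
--             if pr < best and upper.startswith(kw, i):
--                 best = pr
--     return _CATEGORIES[best] if best < 5 else "GEX_REGIME"
-- ===== Notes on version B (the rewrite author's own statement) =====
-- stated objective: alternative
-- what changed: Instead of five priority-ordered any-substring branches, B makes one left-to-right scan of the name, checking all fifteen keywords anchored at each position and keeping the lowest matched priority, then maps that priority to its category (default when none matched).
import Mathlib
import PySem

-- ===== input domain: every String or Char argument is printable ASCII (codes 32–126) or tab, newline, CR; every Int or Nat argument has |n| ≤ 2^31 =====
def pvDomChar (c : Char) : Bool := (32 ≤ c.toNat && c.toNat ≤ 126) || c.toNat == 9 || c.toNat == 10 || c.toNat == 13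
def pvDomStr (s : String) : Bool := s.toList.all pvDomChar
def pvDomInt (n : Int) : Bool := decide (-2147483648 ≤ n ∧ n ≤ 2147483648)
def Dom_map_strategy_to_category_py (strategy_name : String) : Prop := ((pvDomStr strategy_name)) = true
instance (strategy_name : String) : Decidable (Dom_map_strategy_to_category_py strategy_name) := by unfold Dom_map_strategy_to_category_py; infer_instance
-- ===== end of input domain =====

-- B replaces A's five any-substring branches by one positional scan keeping the lowest matched keyword priority; same results.
-- ===== PORT A =====
def map_strategy_to_category_py (strategy_name : String) : Option String :=
  if strategy_name = "" then none
  else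
    let upper := PySem.Str.upper strategy_name
    if ["GEX", "GAMMA", "FLIP"].any (fun s => PySem.Str.isIn s upper) then some "GEX_REGIME"
    else if ["PSYCHOLOGY", "TRAP", "LIBERATION"].any (fun s => PySem.Str.isIn s upper) then some "PSYCHOLOGY_TRAP"
    else if ["RSI", "MOMENTUM"].any (fun s => PySem.Str.isIn s upper) then some "RSI_MULTI_TF"
    else if ["VOL", "IV", "SURFACE", "SKEW"].any (fun s => PySem.Str.isIn s upper) then some "VOL_SURFACE"
    else if ["ML", "MACHINE", "CLASSIFIER"].any (fun s => PySem.Str.isIn s upper) then some "ML_CLASSIFIER"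
    else some "GEX_REGIME"

-- ===== PORT B =====
def pvKeywords : List (String × Nat) :=
  [("GEX", 0), ("GAMMA", 0), ("FLIP", 0),
   ("PSYCHOLOGY", 1), ("TRAP", 1), ("LIBERATION", 1),
   ("RSI", 2), ("MOMENTUM", 2),
   ("VOL", 3), ("IV", 3), ("SURFACE", 3), ("SKEW", 3),
   ("ML", 4), ("MACHINE", 4), ("CLASSIFIER", 4)]

def pvCategories : List String :=
  ["GEX_REGIME", "PSYCHOLOGY_TRAP", "RSI_MULTI_TF", "VOL_SURFACE", "ML_CLASSIFIER"]

-- loop body: 'if pr < best and upper.startswith(kw, i): best = pr'.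
-- upper.startswith(kw, i) is ported by hand as a prefix test on the dropped char list;
-- exact for 0 ≤ i < len(upper), which range(len(upper)) guarantees.
def pvStep (u : List Char) (i : Int) (b : Nat) (kp : String × Nat) : Nat :=
  if kp.2 < b ∧ kp.1.toList.isPrefixOf (u.drop i.toNat) then kp.2 else b

def map_strategy_to_category_py_alt (strategy_name : String) : Option String :=
  if strategy_name = "" then none
  else
    let upper := PySem.Str.upper strategy_name
    let best := (PySem.List.pyRange 0 (PySem.Str.len upper) 1).foldl
      (fun b i => pvKeywords.foldl (pvStep upper.toList i) b) 5
    if best < 5 then some (pvCategories.getD best "GEX_REGIME") else some "GEX_REGIME"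

-- ===== PRECONDITION & SPEC =====
def Spec_map_strategy_to_category_py (strategy_name : String) (out : Option String) : Prop := out = map_strategy_to_category_py_alt strategy_name
instance (strategy_name : String) (out : Option String) : Decidable (Spec_map_strategy_to_category_py strategy_name out) := by unfold Spec_map_strategy_to_category_py; infer_instance

-- ===== CLAIM =====
def Claim_equal_map_strategy_to_category_py : Prop := ∀ (strategy_name : String), Dom_map_strategy_to_category_py strategy_name → Spec_map_strategy_to_category_py strategy_name (map_strategy_to_category_py strategy_name)

-- ===== LEMMAS AND PROOFS =====

theorem pvInner_le (u : List Char) (i : Int) : ∀ (l : List (String × Nat)) (b : Nat),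
    l.foldl (pvStep u i) b ≤ b := by
  intro l
  induction l with
  | nil => intro b; simp
  | cons x t ih =>
    intro b
    simp only [List.foldl_cons, pvStep]
    split_ifs with h
    · exact le_trans (ih _) (le_of_lt h.1)
    · exact ih b

theorem pvInner_le_matched (u : List Char) (i : Int) : ∀ (l : List (String × Nat)) (b : Nat)
    (kp : String × Nat), kp ∈ l → kp.1.toList.isPrefixOf (u.drop i.toNat) = true →
    l.foldl (pvStep u i) b ≤ kp.2 := by
  intro l
  induction l with
  | nil => intro b kp h _; simp at h
  | cons x t ih =>
    intro b kp hmem hpref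
    simp only [List.foldl_cons]
    rcases List.mem_cons.mp hmem with h | h
    · subst h
      have : pvStep u i b kp ≤ kp.2 := by
        simp only [pvStep, hpref, and_true]; split_ifs with h <;> omega
      exact le_trans (pvInner_le u i t _) this
    · exact ih _ _ h hpref

theorem pvInner_cases (u : List Char) (i : Int) : ∀ (l : List (String × Nat)) (b : Nat),
    l.foldl (pvStep u i) b = b ∨
    ∃ kp ∈ l, kp.1.toList.isPrefixOf (u.drop i.toNat) = true ∧ l.foldl (pvStep u i) b = kp.2 := by
  intro l
  induction l with
  | nil => intro b; left; rfl
  | cons x t ih =>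
    intro b
    simp only [List.foldl_cons, pvStep]
    split_ifs with h
    · rcases ih x.2 with h2 | ⟨kp, hm, hp, he⟩
      · right; exact ⟨x, List.mem_cons_self .., h.2, h2⟩
      · right; exact ⟨kp, List.mem_cons_of_mem _ hm, hp, he⟩
    · rcases ih b with h2 | ⟨kp, hm, hp, he⟩
      · left; exact h2
      · right; exact ⟨kp, List.mem_cons_of_mem _ hm, hp, he⟩

def pvOuter (u : List Char) (L : List Int) (b : Nat) : Nat :=
  L.foldl (fun b i => pvKeywords.foldl (pvStep u i) b) b

theorem pvOuter_le (u : List Char) : ∀ (L : List Int) (b : Nat), pvOuter u L b ≤ b := by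
  intro L
  induction L with
  | nil => intro b; exact le_rfl
  | cons i t ih =>
    intro b
    have hstep : pvOuter u (i :: t) b = pvOuter u t (List.foldl (pvStep u i) b pvKeywords) := by
      simp only [pvOuter, List.foldl_cons]
    rw [hstep]
    exact le_trans (ih _) (pvInner_le u i pvKeywords b)

set_option maxHeartbeats 1600000 in
theorem pvOuter_le_matched (u : List Char) : ∀ (L : List Int) (b : Nat) (i : Int)
    (kp : String × Nat), i ∈ L → kp ∈ pvKeywords → kp.1.toList.isPrefixOf (u.drop i.toNat) = true →
    pvOuter u L b ≤ kp.2 := by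
  intro L
  induction L with
  | nil => intro b i kp h; simp at h
  | cons j t ih =>
    intro b i kp hmem hk hp
    rcases List.mem_cons.mp hmem with h | h
    · subst h
      have hstep : pvOuter u (i :: t) b = pvOuter u t (List.foldl (pvStep u i) b pvKeywords) := by
        simp only [pvOuter, List.foldl_cons]
      rw [hstep]
      have h2 := pvInner_le_matched u i pvKeywords b kp hk hp
      generalize hX : List.foldl (pvStep u i) b pvKeywords = X at h2 ⊢
      have h1 := pvOuter_le u t X
      omega
    · have hstep : pvOuter u (j :: t) b = pvOuter u t (List.foldl (pvStep u j) b pvKeywords) := by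
        simp only [pvOuter, List.foldl_cons]
      rw [hstep]
      exact ih _ _ _ h hk hp

theorem pvOuter_cases (u : List Char) : ∀ (L : List Int) (b : Nat),
    pvOuter u L b = b ∨
    ∃ i ∈ L, ∃ kp ∈ pvKeywords, kp.1.toList.isPrefixOf (u.drop i.toNat) = true ∧
      pvOuter u L b = kp.2 := by
  intro L
  induction L with
  | nil => intro b; left; rfl
  | cons j t ih =>
    intro b
    have hstep : pvOuter u (j :: t) b = pvOuter u t (List.foldl (pvStep u j) b pvKeywords) := by
      simp only [pvOuter, List.foldl_cons]
    rcases pvInner_cases u j pvKeywords b with h | ⟨kp, hm, hp, he⟩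
    · rw [hstep, h]
      rcases ih b with h2 | ⟨i, hi, kp, hk, hp2, he2⟩
      · left; exact h2
      · right; exact ⟨i, List.mem_cons_of_mem _ hi, kp, hk, hp2, he2⟩
    · rw [hstep, he]
      rcases ih kp.2 with h2 | ⟨i, hi, kp', hk', hp', he'⟩
      · right; exact ⟨j, List.mem_cons_self .., kp, hm, hp, h2⟩
      · right; exact ⟨i, List.mem_cons_of_mem _ hi, kp', hk', hp', he'⟩

-- keyword kw occurs somewhere in u (matched by the scan) ↔ Python's 'kw in u'
theorem pvPrefAt_iff_isIn (u : List Char) (kw : String) (hne : kw.toList ≠ []) :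
    (∃ i : Int, i ∈ PySem.List.pyRange 0 (u.length : Int) 1 ∧
       kw.toList.isPrefixOf (u.drop i.toNat) = true) ↔ PySem.Chars.isIn kw.toList u = true := by
  rw [← PySem.Chars.exists_prefix_drop_iff_isIn]
  constructor
  · rintro ⟨i, hi, hp⟩
    exact ⟨i.toNat, List.isPrefixOf_iff_prefix.mp hp⟩
  · rintro ⟨j, hp⟩
    have hjlt : j < u.length := by
      by_contra hge
      have : u.drop j = [] := List.drop_eq_nil_of_le (by omega)
      rw [this] at hp
      exact hne (List.prefix_nil.mp hp)
    refine ⟨(j : Int), ?_, ?_⟩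
    · rw [PySem.List.mem_pyRange_one]; omega
    · simpa [List.isPrefixOf_iff_prefix] using hp

theorem pvNoMatch (u : List Char) (b : Nat) (kw : String) (pr : Nat)
    (hmem : (kw, pr) ∈ pvKeywords) (hne : kw.toList ≠ [])
    (hgt : pr < pvOuter u (PySem.List.pyRange 0 (u.length : Int) 1) b) :
    PySem.Chars.isIn kw.toList u = false := by
  by_contra h
  have ht : PySem.Chars.isIn kw.toList u = true := by
    cases hiso : PySem.Chars.isIn kw.toList u
    · exact absurd hiso h
    · rfl
  rcases (pvPrefAt_iff_isIn u kw hne).mpr ht with ⟨i, hi, hp⟩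
  have := pvOuter_le_matched u (PySem.List.pyRange 0 (u.length : Int) 1) b i (kw, pr) hi hmem hp
  omega

-- ===== VERDICT =====
theorem map_strategy_to_category_py_spec : Claim_equal_map_strategy_to_category_py := by
  intro s _
  unfold Spec_map_strategy_to_category_py map_strategy_to_category_py map_strategy_to_category_py_alt
  by_cases hs : s = ""
  · simp [hs]
  · rw [if_neg hs, if_neg hs]
    simp only [PySem.Str.isIn_eq, PySem.Str.len_eq, List.any_cons, List.any_nil, Bool.or_false]
    generalize (PySem.Str.upper s).toList = u
    have hfold : ∀ (L : List Int),
        L.foldl (fun b i => pvKeywords.foldl (pvStep u i) b) 5 = pvOuter u L 5 := fun _ => rfl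
    rw [hfold]
    have hne : ∀ kp ∈ pvKeywords, kp.1.toList ≠ [] := by decide
    rcases pvOuter_cases u (PySem.List.pyRange 0 (u.length : Int) 1) 5 with h | ⟨i, hi, kp, hk, hp, he⟩
    · have hF : ∀ kw pr, ((kw, pr) : String × Nat) ∈ pvKeywords → pr < 5 →
          PySem.Chars.isIn kw.toList u = false := by
        intro kw pr hm hlt
        exact pvNoMatch u 5 kw pr hm (hne _ hm) (by rw [h]; exact hlt)
      have f1 := hF "GEX" 0 (by decide) (by decide)
      have f2 := hF "GAMMA" 0 (by decide) (by decide)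
      have f3 := hF "FLIP" 0 (by decide) (by decide)
      have f4 := hF "PSYCHOLOGY" 1 (by decide) (by decide)
      have f5 := hF "TRAP" 1 (by decide) (by decide)
      have f6 := hF "LIBERATION" 1 (by decide) (by decide)
      have f7 := hF "RSI" 2 (by decide) (by decide)
      have f8 := hF "MOMENTUM" 2 (by decide) (by decide)
      have f9 := hF "VOL" 3 (by decide) (by decide)
      have f10 := hF "IV" 3 (by decide) (by decide)
      have f11 := hF "SURFACE" 3 (by decide) (by decide)
      have f12 := hF "SKEW" 3 (by decide) (by decide)
      have f13 := hF "ML" 4 (by decide) (by decide)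
      have f14 := hF "MACHINE" 4 (by decide) (by decide)
      have f15 := hF "CLASSIFIER" 4 (by decide) (by decide)
      rw [h]
      simp_all
    · have hT : PySem.Chars.isIn kp.1.toList u = true :=
        (pvPrefAt_iff_isIn u kp.1 (hne _ hk)).mp ⟨i, hi, hp⟩
      have hF : ∀ kw pr, ((kw, pr) : String × Nat) ∈ pvKeywords → pr < kp.2 →
          PySem.Chars.isIn kw.toList u = false := by
        intro kw pr hm hlt
        exact pvNoMatch u 5 kw pr hm (hne _ hm) (by rw [he]; exact hlt)
      rw [he]
      clear he hi hp
      simp only [pvKeywords, List.mem_cons, List.not_mem_nil, or_false] at hk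
      rcases hk with h'|h'|h'|h'|h'|h'|h'|h'|h'|h'|h'|h'|h'|h'|h' <;> subst h'
      · -- ("GEX", 0)
        simp_all [pvCategories]
      · -- ("GAMMA", 0)
        simp_all [pvCategories]
      · -- ("FLIP", 0)
        simp_all [pvCategories]
      · -- ("PSYCHOLOGY", 1)
        have f0 := hF "GEX" 0 (by decide) (by decide)
        have f1 := hF "GAMMA" 0 (by decide) (by decide)
        have f2 := hF "FLIP" 0 (by decide) (by decide)
        simp_all [pvCategories]
      · -- ("TRAP", 1)
        have f0 := hF "GEX" 0 (by decide) (by decide)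
        have f1 := hF "GAMMA" 0 (by decide) (by decide)
        have f2 := hF "FLIP" 0 (by decide) (by decide)
        simp_all [pvCategories]
      · -- ("LIBERATION", 1)
        have f0 := hF "GEX" 0 (by decide) (by decide)
        have f1 := hF "GAMMA" 0 (by decide) (by decide)
        have f2 := hF "FLIP" 0 (by decide) (by decide)
        simp_all [pvCategories]
      · -- ("RSI", 2)
        have f0 := hF "GEX" 0 (by decide) (by decide)
        have f1 := hF "GAMMA" 0 (by decide) (by decide)
        have f2 := hF "FLIP" 0 (by decide) (by decide)
        have f3 := hF "PSYCHOLOGY" 1 (by decide) (by decide)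
        have f4 := hF "TRAP" 1 (by decide) (by decide)
        have f5 := hF "LIBERATION" 1 (by decide) (by decide)
        simp_all [pvCategories]
      · -- ("MOMENTUM", 2)
        have f0 := hF "GEX" 0 (by decide) (by decide)
        have f1 := hF "GAMMA" 0 (by decide) (by decide)
        have f2 := hF "FLIP" 0 (by decide) (by decide)
        have f3 := hF "PSYCHOLOGY" 1 (by decide) (by decide)
        have f4 := hF "TRAP" 1 (by decide) (by decide)
        have f5 := hF "LIBERATION" 1 (by decide) (by decide)
        simp_all [pvCategories]
      · -- ("VOL", 3)
        have f0 := hF "GEX" 0 (by decide) (by decide)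
        have f1 := hF "GAMMA" 0 (by decide) (by decide)
        have f2 := hF "FLIP" 0 (by decide) (by decide)
        have f3 := hF "PSYCHOLOGY" 1 (by decide) (by decide)
        have f4 := hF "TRAP" 1 (by decide) (by decide)
        have f5 := hF "LIBERATION" 1 (by decide) (by decide)
        have f6 := hF "RSI" 2 (by decide) (by decide)
        have f7 := hF "MOMENTUM" 2 (by decide) (by decide)
        simp_all [pvCategories]
      · -- ("IV", 3)
        have f0 := hF "GEX" 0 (by decide) (by decide)
        have f1 := hF "GAMMA" 0 (by decide) (by decide)
        have f2 := hF "FLIP" 0 (by decide) (by decide)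
        have f3 := hF "PSYCHOLOGY" 1 (by decide) (by decide)
        have f4 := hF "TRAP" 1 (by decide) (by decide)
        have f5 := hF "LIBERATION" 1 (by decide) (by decide)
        have f6 := hF "RSI" 2 (by decide) (by decide)
        have f7 := hF "MOMENTUM" 2 (by decide) (by decide)
        simp_all [pvCategories]
      · -- ("SURFACE", 3)
        have f0 := hF "GEX" 0 (by decide) (by decide)
        have f1 := hF "GAMMA" 0 (by decide) (by decide)
        have f2 := hF "FLIP" 0 (by decide) (by decide)
        have f3 := hF "PSYCHOLOGY" 1 (by decide) (by decide)
        have f4 := hF "TRAP" 1 (by decide) (by decide)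
        have f5 := hF "LIBERATION" 1 (by decide) (by decide)
        have f6 := hF "RSI" 2 (by decide) (by decide)
        have f7 := hF "MOMENTUM" 2 (by decide) (by decide)
        simp_all [pvCategories]
      · -- ("SKEW", 3)
        have f0 := hF "GEX" 0 (by decide) (by decide)
        have f1 := hF "GAMMA" 0 (by decide) (by decide)
        have f2 := hF "FLIP" 0 (by decide) (by decide)
        have f3 := hF "PSYCHOLOGY" 1 (by decide) (by decide)
        have f4 := hF "TRAP" 1 (by decide) (by decide)
        have f5 := hF "LIBERATION" 1 (by decide) (by decide)
        have f6 := hF "RSI" 2 (by decide) (by decide)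
        have f7 := hF "MOMENTUM" 2 (by decide) (by decide)
        simp_all [pvCategories]
      · -- ("ML", 4)
        have f0 := hF "GEX" 0 (by decide) (by decide)
        have f1 := hF "GAMMA" 0 (by decide) (by decide)
        have f2 := hF "FLIP" 0 (by decide) (by decide)
        have f3 := hF "PSYCHOLOGY" 1 (by decide) (by decide)
        have f4 := hF "TRAP" 1 (by decide) (by decide)
        have f5 := hF "LIBERATION" 1 (by decide) (by decide)
        have f6 := hF "RSI" 2 (by decide) (by decide)
        have f7 := hF "MOMENTUM" 2 (by decide) (by decide)
        have f8 := hF "VOL" 3 (by decide) (by decide)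
        have f9 := hF "IV" 3 (by decide) (by decide)
        have f10 := hF "SURFACE" 3 (by decide) (by decide)
        have f11 := hF "SKEW" 3 (by decide) (by decide)
        simp_all [pvCategories]
      · -- ("MACHINE", 4)
        have f0 := hF "GEX" 0 (by decide) (by decide)
        have f1 := hF "GAMMA" 0 (by decide) (by decide)
        have f2 := hF "FLIP" 0 (by decide) (by decide)
        have f3 := hF "PSYCHOLOGY" 1 (by decide) (by decide)
        have f4 := hF "TRAP" 1 (by decide) (by decide)
        have f5 := hF "LIBERATION" 1 (by decide) (by decide)
        have f6 := hF "RSI" 2 (by decide) (by decide)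
        have f7 := hF "MOMENTUM" 2 (by decide) (by decide)
        have f8 := hF "VOL" 3 (by decide) (by decide)
        have f9 := hF "IV" 3 (by decide) (by decide)
        have f10 := hF "SURFACE" 3 (by decide) (by decide)
        have f11 := hF "SKEW" 3 (by decide) (by decide)
        simp_all [pvCategories]
      · -- ("CLASSIFIER", 4)
        have f0 := hF "GEX" 0 (by decide) (by decide)
        have f1 := hF "GAMMA" 0 (by decide) (by decide)
        have f2 := hF "FLIP" 0 (by decide) (by decide)
        have f3 := hF "PSYCHOLOGY" 1 (by decide) (by decide)
        have f4 := hF "TRAP" 1 (by decide) (by decide)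
        have f5 := hF "LIBERATION" 1 (by decide) (by decide)
        have f6 := hF "RSI" 2 (by decide) (by decide)
        have f7 := hF "MOMENTUM" 2 (by decide) (by decide)
        have f8 := hF "VOL" 3 (by decide) (by decide)
        have f9 := hF "IV" 3 (by decide) (by decide)
        have f10 := hF "SURFACE" 3 (by decide) (by decide)
        have f11 := hF "SKEW" 3 (by decide) (by decide)
        simp_all [pvCategories]
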